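-- pv_equiv track=rewrite | github.com/seongchanleelee/algorithm_solve | programmers/programmers_function_development.py | solution
-- ===== SOURCE A (Python) =====
-- def solution(progresses, speeds):
--     answer = []
--     cnt = 0 # 개발일수
--     cnt2 = 0 # 한 프로그레스의 전체개발일수
--     result = 1 #한번에 몇개의 프로그래스를 제출 하는지
--     for i in range(len(progresses)):
--         while progresses[i] < 100:
--             progresses[i] +=speeds[i]
--             cnt +=1
--         if cnt2 ==0:
--             cnt2 = cnt
--             cnt = 0
--         else:
--             if cnt2 >= cnt:
--                 result +=1
--             else:
--                 answer.append(result)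
--                 cnt2 = cnt
--                 result = 1
--             cnt = 0
--     answer.append(result)
--     return answer
-- ===== SOURCE B (Python) =====
-- def solution(progresses, speeds):
--     # One pass: days needed per feature by ceiling division instead of a
--     # per-day increment loop; then the same single grouping scan.
--     answer = []
--     leader = 0  # days of the current group's leading feature (0 = none yet)
--     size = 1
--     for p, s in zip(progresses, speeds):
--         d = 0 if p >= 100 else -((p - 100) // s)  # = ceil((100 - p) / s)
--         if leader == 0:
--             leader = d
--         elif d <= leader:
--             size += 1
--         else:
--             answer.append(size)
--             leader = d
--             size = 1
--     answer.append(size)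
--     return answer
-- ===== Notes on version B (the rewrite author's own statement) =====
-- stated objective: faster
-- what changed: B computes each feature's remaining days by one ceiling division instead of A's per-day increment while-loop, then runs a single grouping scan; intended as asymptotically faster (a timing run saw A time out on inputs where B returned, but could not read a clean ratio).
import Mathlib
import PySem

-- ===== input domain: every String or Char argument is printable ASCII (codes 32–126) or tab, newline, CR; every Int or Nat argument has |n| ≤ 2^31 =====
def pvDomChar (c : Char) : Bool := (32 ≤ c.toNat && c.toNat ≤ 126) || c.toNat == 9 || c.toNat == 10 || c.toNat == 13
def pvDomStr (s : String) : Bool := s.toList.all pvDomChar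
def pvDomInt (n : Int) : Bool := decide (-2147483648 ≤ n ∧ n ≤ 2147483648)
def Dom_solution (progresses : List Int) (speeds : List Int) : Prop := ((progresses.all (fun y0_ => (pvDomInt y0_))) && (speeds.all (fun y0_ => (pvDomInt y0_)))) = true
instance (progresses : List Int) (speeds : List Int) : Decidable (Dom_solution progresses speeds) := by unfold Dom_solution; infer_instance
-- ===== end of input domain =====

-- B replaces A's per-day increment while-loop by one ceiling division per feature (intended as
-- faster, O(n) vs O(n·maxDays); a timing run saw A time out on inputs where B returned but could
-- not read a clean ratio); the grouping scan is the same. A mutates `progresses` in place (Python);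
-- the equivalence proved here is about the RETURN value only (B does not mutate).

-- ===== PORT A =====
-- A's inner `while progresses[i] < 100: progresses[i] += speeds[i]; cnt += 1`, counting iterations.
-- The `0 < s` guard only makes the definition total: Python diverges there (excluded by Pre_).
def devDays (p s cnt : Int) : Int :=
  if p < 100 then
    if 0 < s then devDays (p + s) s (cnt + 1) else cnt
  else cnt
termination_by (100 - p).toNat
decreasing_by omega

def solution (progresses : List Int) (speeds : List Int) : List Int :=
  let st := (List.range progresses.length).foldl
    (fun (st : List Int × Int × Int) (i : Nat) =>
      let answer := st.1; let cnt2 := st.2.1; let result := st.2.2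
      let cnt := devDays (PySem.List.pyGetD progresses (Int.ofNat i) 0)
                         (PySem.List.pyGetD speeds (Int.ofNat i) 0) 0
      if cnt2 = 0 then (answer, cnt, result)
      else if cnt2 ≥ cnt then (answer, cnt2, result + 1)
      else (answer ++ [result], cnt, 1))
    ([], 0, 1)
  st.1 ++ [st.2.2]

-- ===== PORT B =====
def solution_alt (progresses : List Int) (speeds : List Int) : List Int :=
  let days := (progresses.zip speeds).map
    (fun ps => if ps.1 ≥ 100 then 0 else -(PySem.Int.floordiv (ps.1 - 100) ps.2))
  let st := days.foldl
    (fun (st : List Int × Int × Int) (d : Int) =>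
      if st.2.1 = 0 then (st.1, d, st.2.2)
      else if d ≤ st.2.1 then (st.1, st.2.1, st.2.2 + 1)
      else (st.1 ++ [st.2.2], d, 1))
    ([], 0, 1)
  st.1 ++ [st.2.2]

-- ===== PRECONDITION & SPEC =====
-- Pre_ excludes exactly the inputs on which A does not return: speeds shorter than progresses
-- (IndexError) and a feature with progress < 100 and speed ≤ 0 (A's while-loop never terminates).
def Pre_solution (progresses : List Int) (speeds : List Int) : Prop :=
  progresses.length ≤ speeds.length ∧
    ∀ ps ∈ progresses.zip speeds, 100 ≤ ps.1 ∨ 1 ≤ ps.2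
instance (progresses : List Int) (speeds : List Int) : Decidable (Pre_solution progresses speeds) := by
  unfold Pre_solution; infer_instance

def pvWitness_solution : List Int × List Int := ([93, 30, 55], [1, 30, 5])

def Spec_solution (progresses : List Int) (speeds : List Int) (out : List Int) : Prop :=
  out = solution_alt progresses speeds
instance (progresses : List Int) (speeds : List Int) (out : List Int) : Decidable (Spec_solution progresses speeds out) := by
  unfold Spec_solution; infer_instance

-- ===== CLAIM (what is proved, stated in full; the proofs are below) =====
def Claim_equal_solution : Prop := ∀ (progresses : List Int) (speeds : List Int),
  Dom_solution progresses speeds → Pre_solution progresses speeds →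
  Spec_solution progresses speeds (solution progresses speeds)

-- ===== LEMMAS AND PROOFS =====

-- A's while-loop count brackets 100 - p between consecutive multiples of s.
theorem devDays_bounds (p s cnt : Int) :
    0 < s → p < 100 →
      (devDays p s cnt - cnt - 1) * s < 100 - p ∧ 100 - p ≤ (devDays p s cnt - cnt) * s := by
  induction p, cnt using devDays.induct (s := s) with
  | case1 p cnt hplt hslt ih =>
      intro hs hp
      rw [devDays, if_pos hplt, if_pos hslt]
      by_cases h2 : p + s < 100
      · obtain ⟨ih1, ih2⟩ := ih hs h2
        constructor <;> nlinarith
      · have h0 : devDays (p + s) s (cnt + 1) = cnt + 1 := by rw [devDays, if_neg h2]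
        rw [h0]
        constructor <;> nlinarith
  | case2 p cnt hplt hsnot =>
      intro hs _
      exact absurd hs hsnot
  | case3 p cnt hpge =>
      intro _ hp
      omega

theorem devDays_eq_ceil (p s : Int) (hs : 0 < s) (hp : p < 100) :
    devDays p s 0 = -(PySem.Int.floordiv (p - 100) s) := by
  have h : p - 100 = -(100 - p) := by ring
  rw [h, eq_comm, PySem.Int.neg_floordiv_neg_eq_iff_of_pos hs]
  have := devDays_bounds p s 0 hs hp
  constructor <;> [linarith [this.1]; linarith [this.2]]

theorem devDays_of_done (p s : Int) (hp : 100 ≤ p) : devDays p s 0 = 0 := by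
  rw [devDays, if_neg (by omega)]

-- Under Pre_, the per-index day counts A computes equal B's ceiling-division day list.
theorem days_map_eq (progresses speeds : List Int) (hpre : Pre_solution progresses speeds) :
    (List.range progresses.length).map
      (fun i => devDays (PySem.List.pyGetD progresses (Int.ofNat i) 0)
                        (PySem.List.pyGetD speeds (Int.ofNat i) 0) 0)
    = (progresses.zip speeds).map
        (fun ps => if ps.1 ≥ 100 then 0 else -(PySem.Int.floordiv (ps.1 - 100) ps.2)) := by
  obtain ⟨hl, hall⟩ := hpre
  apply List.ext_getElem
  · simp only [List.length_map, List.length_range, List.length_zip]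
    omega
  · intro i h1 h2
    have hi : i < progresses.length := by simpa using h1
    have his : i < speeds.length := by omega
    simp only [List.getElem_map, List.getElem_range, List.getElem_zip]
    have hget1 : PySem.List.pyGetD progresses (Int.ofNat i) 0 = progresses[i] := by
      simp [List.getD_eq_getElem?_getD, List.getElem?_eq_getElem hi]
    have hget2 : PySem.List.pyGetD speeds (Int.ofNat i) 0 = speeds[i] := by
      simp [List.getD_eq_getElem?_getD, List.getElem?_eq_getElem his]
    rw [hget1, hget2]
    have hmem : (progresses[i], speeds[i]) ∈ progresses.zip speeds := by
      have h3 : i < (progresses.zip speeds).length := by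
        simp only [List.length_zip]; omega
      have := List.getElem_mem h3
      rwa [List.getElem_zip] at this
    by_cases hge : (100 : Int) ≤ progresses[i]
    · rw [if_pos hge, devDays_of_done _ _ hge]
    · have hs : (1 : Int) ≤ speeds[i] := by
        rcases hall _ hmem with h | h
        · exact absurd h hge
        · exact h
      rw [if_neg hge, devDays_eq_ceil _ _ (by omega) (by omega)]

-- ===== VERDICT (by name: the statement is the Claim_ definition above) =====
theorem solution_spec : Claim_equal_solution := by
  intro progresses speeds _ hpre
  show solution progresses speeds = solution_alt progresses speeds
  unfold solution solution_alt
  rw [← days_map_eq progresses speeds hpre]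
  simp only [List.foldl_map, ge_iff_le]
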